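-- pv_equiv track=rewrite | github.com/Moataz0000/codeforces_problem_solving | 108.py | get_max_operaiton
-- ===== SOURCE A (Python) =====
-- def is_even(n: int) -> bool:
--     return bool(n % 2 == 0)
--
-- def get_max_operaiton(arr: list) -> int:
--    operation_count = 0
--    while True:
--       for x in arr:
--          if not is_even(x): # the num is odd
--             return operation_count
--
--       arr = [x // 2 for x in arr]
--       operation_count += 1
-- ===== SOURCE B (Python) =====
-- def get_max_operaiton(arr: list) -> int:
--     # single pass: the answer is the minimum number of trailing factors of 2
--     # over the nonzero elements (zeros stay even forever and never stop the loop)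
--     best = None
--     for x in arr:
--         if x != 0:
--             t = 0
--             while x % 2 == 0:
--                 x //= 2
--                 t += 1
--             if best is None or t < best:
--                 best = t
--     return best
-- ===== Notes on version B (the rewrite author's own statement) =====
-- stated objective: alternative
-- what changed: Instead of repeatedly rebuilding the whole halved list until some element turns odd, B makes a single pass taking the minimum count of trailing factors of 2 over the nonzero elements.
import Mathlib
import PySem

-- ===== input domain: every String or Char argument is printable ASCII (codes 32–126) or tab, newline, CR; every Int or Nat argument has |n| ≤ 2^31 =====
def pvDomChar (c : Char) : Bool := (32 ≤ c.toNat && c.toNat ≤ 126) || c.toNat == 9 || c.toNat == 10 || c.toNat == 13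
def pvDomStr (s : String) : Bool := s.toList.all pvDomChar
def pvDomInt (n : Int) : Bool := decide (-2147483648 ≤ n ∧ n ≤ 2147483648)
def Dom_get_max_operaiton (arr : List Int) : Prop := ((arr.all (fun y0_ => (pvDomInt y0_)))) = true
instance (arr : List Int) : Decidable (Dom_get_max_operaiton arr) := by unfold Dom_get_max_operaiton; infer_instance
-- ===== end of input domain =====

-- B replaces A's repeated halve-the-whole-list passes by a single pass taking the minimum
-- number of trailing factors of 2 over the nonzero elements (objective: alternative algorithm).

-- ===== PORT A =====
-- is_even(n): n % 2 == 0
def pyIsEven (n : Int) : Bool := PySem.Int.mod n 2 == 0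

theorem notEven_true_iff (x : Int) : (!pyIsEven x) = true ↔ PySem.Int.mod x 2 ≠ 0 := by
  simp only [pyIsEven, Bool.not_eq_true', beq_eq_false_iff_ne, ne_eq]

-- x = 2*(x//2) for even x (used for termination of the A-port loop)
theorem even_eq_two_mul (x : Int) (h : PySem.Int.mod x 2 = 0) :
    x = 2 * PySem.Int.floordiv x 2 := by
  have hdvd : (2 : Int) ∣ x := (PySem.Int.mod_eq_zero_iff_dvd x 2).1 h
  rw [PySem.Int.floordiv_eq_ediv_of_pos (by norm_num)]
  exact (Int.mul_ediv_cancel' hdvd).symm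

theorem sum_natAbs_halve_le (arr : List Int)
    (h : ∀ x ∈ arr, PySem.Int.mod x 2 = 0) :
    ((arr.map (fun x => PySem.Int.floordiv x 2)).map Int.natAbs).sum ≤
      (arr.map Int.natAbs).sum := by
  induction arr with
  | nil => simp
  | cons a l ih =>
    have ha := even_eq_two_mul a (h a (by simp))
    have hle : (PySem.Int.floordiv a 2).natAbs ≤ a.natAbs := by omega
    simp only [List.map_cons, List.sum_cons]
    have := ih (fun x hx => h x (by simp [hx]))
    omega

theorem sum_natAbs_halve_lt (arr : List Int)
    (h : ∀ x ∈ arr, PySem.Int.mod x 2 = 0) (hnz : ∃ x ∈ arr, x ≠ 0) :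
    ((arr.map (fun x => PySem.Int.floordiv x 2)).map Int.natAbs).sum <
      (arr.map Int.natAbs).sum := by
  induction arr with
  | nil => simp at hnz
  | cons a l ih =>
    have ha := even_eq_two_mul a (h a (by simp))
    have hlel := sum_natAbs_halve_le l (fun x hx => h x (by simp [hx]))
    simp only [List.map_cons, List.sum_cons]
    rcases hnz with ⟨x, hx, hxne⟩
    rcases List.mem_cons.1 hx with rfl | hxl
    · have : (PySem.Int.floordiv x 2).natAbs < x.natAbs := by omega
      omega
    · have := ih (fun y hy => h y (by simp [hy])) ⟨x, hxl, hxne⟩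
      have : (PySem.Int.floordiv a 2).natAbs ≤ a.natAbs := by omega
      omega

-- A's while-True loop: return the count at the first pass that sees an odd element,
-- otherwise halve every element and repeat.  The all-zero guard only makes the
-- function total: there the Python loops forever (such inputs are outside Pre_).
def gmAux (arr : List Int) (c : Int) : Int :=
  if arr.any (fun x => !pyIsEven x) then c
  else if arr.all (fun x => x == 0) then c
  else gmAux (arr.map (fun x => PySem.Int.floordiv x 2)) (c + 1)
termination_by (arr.map Int.natAbs).sum
decreasing_by
  rename_i h1 h2
  have hmap : List.map (fun (x : {x // x ∈ arr}) => PySem.Int.floordiv x.1 2) arr.attach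
      = List.map (fun x => PySem.Int.floordiv x 2) arr := by
    simp
  simp only [hmap]
  have h1' : ∀ x ∈ arr, PySem.Int.mod x 2 = 0 := by
    intro x hx
    by_contra hne
    exact h1 (List.any_eq_true.2 ⟨x, hx, (notEven_true_iff x).2 hne⟩)
  have h2' : ∃ x ∈ arr, x ≠ 0 := by
    by_contra hall
    push Not at hall
    exact h2 (by simp only [List.all_eq_true, beq_iff_eq]; exact hall)
  exact sum_natAbs_halve_lt arr h1' h2'

def get_max_operaiton (arr : List Int) : Int := gmAux arr 0

-- ===== PORT B =====
-- inner while loop of B: count trailing factors of 2 (the x ≠ 0 conjunct is a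
-- totality guard; B only calls it on nonzero x, where Python's loop terminates)
def pyV2 (x : Int) (t : Int) : Int :=
  if h : x ≠ 0 ∧ PySem.Int.mod x 2 = 0 then pyV2 (PySem.Int.floordiv x 2) (t + 1) else t
termination_by x.natAbs
decreasing_by
  have := even_eq_two_mul x h.2
  have hx := h.1
  omega

-- B's single pass: running minimum (as Option) of pyV2 over nonzero elements
def fstep (best : Option Int) (x : Int) : Option Int :=
  if x ≠ 0 then
    let t := pyV2 x 0
    match best with
    | none => some t
    | some b => if t < b then some t else some b
  else best

def get_max_operaiton_alt (arr : List Int) : Int :=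
  match arr.foldl fstep none with
  | some b => b
  | none => 0   -- unreachable under Pre_ (Python B returns None here; A never returns)

-- ===== PRECONDITION & SPEC =====
-- Pre_ excludes exactly the inputs with no nonzero element (empty or all zeros):
-- there A loops forever (every pass stays all even) and B returns None, not an int.
def Pre_get_max_operaiton (arr : List Int) : Prop := ∃ x ∈ arr, x ≠ 0
instance (arr : List Int) : Decidable (Pre_get_max_operaiton arr) := by
  unfold Pre_get_max_operaiton; infer_instance
def pvWitness_get_max_operaiton : List Int := [12, 4, -6]

def Spec_get_max_operaiton (arr : List Int) (out : Int) : Prop := out = get_max_operaiton_alt arr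
instance (arr : List Int) (out : Int) : Decidable (Spec_get_max_operaiton arr out) := by unfold Spec_get_max_operaiton; infer_instance

-- ===== CLAIM (what is proved, stated in full; the proofs are below) =====
def Claim_equal_get_max_operaiton : Prop := ∀ (arr : List Int), Dom_get_max_operaiton arr → Pre_get_max_operaiton arr → Spec_get_max_operaiton arr (get_max_operaiton arr)

-- ===== LEMMAS AND PROOFS =====

-- pyV2 accumulator shift
theorem pyV2_shift_aux : ∀ (N : Nat) (x : Int), x.natAbs = N → ∀ t, pyV2 x t = t + pyV2 x 0 := by
  intro N
  induction N using Nat.strong_induction_on with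
  | _ N ih =>
    intro x hN t
    by_cases h : x ≠ 0 ∧ PySem.Int.mod x 2 = 0
    · have hlt : (PySem.Int.floordiv x 2).natAbs < N := by
        have h2m := even_eq_two_mul x h.2
        have hx0 := h.1
        omega
      have e1 : pyV2 x t = pyV2 (PySem.Int.floordiv x 2) (t + 1) := by
        conv_lhs => rw [pyV2]
        rw [dif_pos h]
      have e2 : pyV2 x 0 = pyV2 (PySem.Int.floordiv x 2) (0 + 1) := by
        conv_lhs => rw [pyV2]
        rw [dif_pos h]
      rw [e1, e2, ih _ hlt _ rfl (t + 1), ih _ hlt _ rfl (0 + 1)]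
      ring
    · have e1 : pyV2 x t = t := by
        conv_lhs => rw [pyV2]
        rw [dif_neg h]
      have e2 : pyV2 x 0 = 0 := by
        conv_lhs => rw [pyV2]
        rw [dif_neg h]
      rw [e1, e2]; ring

theorem pyV2_shift (x t : Int) : pyV2 x t = t + pyV2 x 0 :=
  pyV2_shift_aux x.natAbs x rfl t

theorem pyV2_nonneg_aux : ∀ (N : Nat) (x : Int), x.natAbs = N → 0 ≤ pyV2 x 0 := by
  intro N
  induction N using Nat.strong_induction_on with
  | _ N ih =>
    intro x hN
    by_cases h : x ≠ 0 ∧ PySem.Int.mod x 2 = 0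
    · have hlt : (PySem.Int.floordiv x 2).natAbs < N := by
        have h2m := even_eq_two_mul x h.2
        have hx0 := h.1
        omega
      have e : pyV2 x 0 = pyV2 (PySem.Int.floordiv x 2) (0 + 1) := by
        conv_lhs => rw [pyV2]
        rw [dif_pos h]
      rw [e, pyV2_shift]
      have := ih _ hlt _ rfl
      omega
    · have e : pyV2 x 0 = 0 := by
        conv_lhs => rw [pyV2]
        rw [dif_neg h]
      omega

theorem pyV2_nonneg (x : Int) : 0 ≤ pyV2 x 0 := pyV2_nonneg_aux x.natAbs x rfl

theorem pyV2_odd (x : Int) (h : PySem.Int.mod x 2 ≠ 0) : pyV2 x 0 = 0 := by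
  conv_lhs => rw [pyV2]
  rw [dif_neg (fun hc => h hc.2)]

theorem pyV2_even (x : Int) (hx : x ≠ 0) (h : PySem.Int.mod x 2 = 0) :
    pyV2 x 0 = pyV2 (PySem.Int.floordiv x 2) 0 + 1 := by
  have e : pyV2 x 0 = pyV2 (PySem.Int.floordiv x 2) (0 + 1) := by
    conv_lhs => rw [pyV2]
    rw [dif_pos ⟨hx, h⟩]
  rw [e, pyV2_shift]; ring

-- fold with a some-accumulator: result is a min of the accumulator and the v2's seen
theorem fold_some_spec (arr : List Int) (b : Int) :
    ∃ m, List.foldl fstep (some b) arr = some m ∧ m ≤ b ∧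
      (m = b ∨ ∃ x ∈ arr, x ≠ 0 ∧ pyV2 x 0 = m) ∧
      (∀ x ∈ arr, x ≠ 0 → m ≤ pyV2 x 0) := by
  induction arr generalizing b with
  | nil => exact ⟨b, by simp⟩
  | cons x l ih =>
    rw [List.foldl_cons]
    by_cases hx : x = 0
    · obtain ⟨m, hfold, hle, hwit, hbd⟩ := ih b
      refine ⟨m, ?_, hle, ?_, ?_⟩
      · simpa [fstep, hx] using hfold
      · rcases hwit with h | ⟨y, hy, hh⟩
        · exact Or.inl h
        · exact Or.inr ⟨y, List.mem_cons_of_mem _ hy, hh⟩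
      · intro y hy hy0
        rcases List.mem_cons.1 hy with rfl | hyl
        · exact absurd hx hy0
        · exact hbd y hyl hy0
    · have hstep : fstep (some b) x =
          if pyV2 x 0 < b then some (pyV2 x 0) else some b := by
        simp [fstep, hx]
      by_cases ht : pyV2 x 0 < b
      · obtain ⟨m, hfold, hle, hwit, hbd⟩ := ih (pyV2 x 0)
        refine ⟨m, by rw [hstep, if_pos ht]; exact hfold, by omega, ?_, ?_⟩
        · rcases hwit with h | ⟨y, hy, hh⟩
          · exact Or.inr ⟨x, List.mem_cons_self, hx, h.symm⟩
          · exact Or.inr ⟨y, List.mem_cons_of_mem _ hy, hh⟩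
        · intro y hy hy0
          rcases List.mem_cons.1 hy with rfl | hyl
          · omega
          · exact hbd y hyl hy0
      · obtain ⟨m, hfold, hle, hwit, hbd⟩ := ih b
        refine ⟨m, by rw [hstep, if_neg ht]; exact hfold, hle, ?_, ?_⟩
        · rcases hwit with h | ⟨y, hy, hh⟩
          · exact Or.inl h
          · exact Or.inr ⟨y, List.mem_cons_of_mem _ hy, hh⟩
        · intro y hy hy0
          rcases List.mem_cons.1 hy with rfl | hyl
          · omega
          · exact hbd y hyl hy0

theorem F_spec (arr : List Int) (h : ∃ x ∈ arr, x ≠ 0) :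
    ∃ m, List.foldl fstep none arr = some m ∧
      (∃ x ∈ arr, x ≠ 0 ∧ pyV2 x 0 = m) ∧
      (∀ x ∈ arr, x ≠ 0 → m ≤ pyV2 x 0) := by
  induction arr with
  | nil => simp at h
  | cons x l ih =>
    rw [List.foldl_cons]
    by_cases hx : x = 0
    · have hl : ∃ y ∈ l, y ≠ 0 := by
        rcases h with ⟨y, hy, hy0⟩
        rcases List.mem_cons.1 hy with rfl | hyl
        · exact absurd hx hy0
        · exact ⟨y, hyl, hy0⟩
      obtain ⟨m, hfold, hwit, hbd⟩ := ih hl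
      refine ⟨m, ?_, ?_, ?_⟩
      · simpa [fstep, hx] using hfold
      · rcases hwit with ⟨y, hy, hh⟩
        exact ⟨y, List.mem_cons_of_mem _ hy, hh⟩
      · intro y hy hy0
        rcases List.mem_cons.1 hy with rfl | hyl
        · exact absurd hx hy0
        · exact hbd y hyl hy0
    · have hstep : fstep none x = some (pyV2 x 0) := by simp [fstep, hx]
      rw [hstep]
      obtain ⟨m, hfold, hle, hwit, hbd⟩ := fold_some_spec l (pyV2 x 0)
      refine ⟨m, hfold, ?_, ?_⟩
      · rcases hwit with hh | ⟨y, hy, hh⟩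
        · exact ⟨x, List.mem_cons_self, hx, hh.symm⟩
        · exact ⟨y, List.mem_cons_of_mem _ hy, hh⟩
      · intro y hy hy0
        rcases List.mem_cons.1 hy with rfl | hyl
        · omega
        · exact hbd y hyl hy0

theorem gmAux_eq (N : Nat) : ∀ (arr : List Int) (c m : Int),
    (arr.map Int.natAbs).sum = N →
    (∃ x ∈ arr, x ≠ 0 ∧ pyV2 x 0 = m) →
    (∀ x ∈ arr, x ≠ 0 → m ≤ pyV2 x 0) →
    gmAux arr c = c + m := by
  induction N using Nat.strong_induction_on with
  | _ N ih =>
    intro arr c m hsum hw hb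
    rw [gmAux]
    by_cases hodd : arr.any (fun x => !pyIsEven x)
    · rw [if_pos hodd]
      simp only [List.any_eq_true] at hodd
      obtain ⟨y, hy, hyb⟩ := hodd
      have hyodd : PySem.Int.mod y 2 ≠ 0 := (notEven_true_iff y).1 hyb
      have hy0 : y ≠ 0 := by
        rintro rfl
        exact hyodd (by decide)
      have h1 : m ≤ 0 := by
        have := hb y hy hy0
        rw [pyV2_odd y hyodd] at this
        exact this
      obtain ⟨x, hx, hxne, hxm⟩ := hw
      have h2 : 0 ≤ m := hxm ▸ pyV2_nonneg x
      omega
    · rw [if_neg hodd]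
      have heven : ∀ x ∈ arr, PySem.Int.mod x 2 = 0 := by
        intro x hx
        by_contra hne
        exact hodd (List.any_eq_true.2 ⟨x, hx, (notEven_true_iff x).2 hne⟩)
      obtain ⟨x, hx, hxne, hxm⟩ := hw
      have hnz : ∃ x ∈ arr, x ≠ 0 := ⟨x, hx, hxne⟩
      have hallz : ¬ arr.all (fun x => x == 0) = true := by
        simp only [List.all_eq_true, beq_iff_eq]
        push Not
        exact hnz
      rw [if_neg hallz]
      have hlt : ((arr.map (fun x => PySem.Int.floordiv x 2)).map Int.natAbs).sum < N := by
        rw [← hsum]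
        exact sum_natAbs_halve_lt arr heven hnz
      have hx2 : PySem.Int.floordiv x 2 ≠ 0 := by
        have := even_eq_two_mul x (heven x hx)
        intro h0
        omega
      have hwit' : ∃ y ∈ arr.map (fun x => PySem.Int.floordiv x 2), y ≠ 0 ∧ pyV2 y 0 = m - 1 := by
        refine ⟨PySem.Int.floordiv x 2, List.mem_map_of_mem hx, hx2, ?_⟩
        have := pyV2_even x hxne (heven x hx)
        omega
      have hbd' : ∀ y ∈ arr.map (fun x => PySem.Int.floordiv x 2), y ≠ 0 → m - 1 ≤ pyV2 y 0 := by
        intro y' hy' hy'0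
        obtain ⟨y, hy, rfl⟩ := List.mem_map.1 hy'
        have hy0 : y ≠ 0 := by
          rintro rfl
          exact hy'0 (by decide)
        have hstep := pyV2_even y hy0 (heven y hy)
        have := hb y hy hy0
        omega
      rw [ih _ hlt _ (c + 1) (m - 1) rfl hwit' hbd']
      ring

-- ===== VERDICT (by name: the statement is the Claim_ definition above) =====
theorem get_max_operaiton_spec : Claim_equal_get_max_operaiton := by
  intro arr _ hpre
  unfold Spec_get_max_operaiton get_max_operaiton get_max_operaiton_alt
  obtain ⟨m, hF, hw, hb⟩ := F_spec arr hpre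
  rw [hF, gmAux_eq ((arr.map Int.natAbs).sum) arr 0 m rfl hw hb]
  ring
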